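-- pv_equiv track=rewrite | github.com/adamggrim/textwarp | textwarp/_lib/casing/programming_casing.py | _chunk_by_alnum
-- ===== SOURCE A (Python) =====
-- def _chunk_by_alnum(text: str) -> list[str]:
--     """
--     Split text into alternating alphanumeric and non-alphanumeric
--     chunks.
--
--     Args:
--         text: The string to split.
--
--     Returns:
--         list[str]: The split chunks, where the first chunk is
--             alphanumeric if the string starts with an alphanumeric
--             character; otherwise non-alphanumeric.
--     """
--     if not text:
--         return []
--
--     chunks = []
--     current_chars = []
--     is_alnum = None
--
--     for char in text:
--         char_alnum = char.isalnum()
--         if is_alnum is None: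
--             is_alnum = char_alnum
--
--         if char_alnum == is_alnum:
--             current_chars.append(char)
--         else:
--             chunks.append(''.join(current_chars))
--             current_chars = [char]
--             is_alnum = char_alnum
--
--     if current_chars:
--         chunks.append(''.join(current_chars))
--
--     return chunks
-- ===== SOURCE B (Python) =====
-- def _chunk_by_alnum(text: str) -> list[str]:
--     """Split text into alternating alphanumeric/non-alphanumeric chunks
--     by first computing the cut positions where the isalnum class flips,
--     then slicing the string at those boundaries (two staged passes)."""
--     if not text:
--         return []
--     keys = [ch.isalnum() for ch in text]
--     cuts = [i for i in range(1, len(text)) if keys[i] != keys[i - 1]]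
--     bounds = [0] + cuts + [len(text)]
--     return [text[a:b] for a, b in zip(bounds, bounds[1:])]
-- ===== Notes on version B (the rewrite author's own statement) =====
-- stated objective: alternative
-- what changed: Replaces A's single-pass run accumulator (chunks/current_chars/is_alnum state) by two staged passes: first compute the list of cut indices where the isalnum class flips, then slice the string at those boundaries.
import Mathlib
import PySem

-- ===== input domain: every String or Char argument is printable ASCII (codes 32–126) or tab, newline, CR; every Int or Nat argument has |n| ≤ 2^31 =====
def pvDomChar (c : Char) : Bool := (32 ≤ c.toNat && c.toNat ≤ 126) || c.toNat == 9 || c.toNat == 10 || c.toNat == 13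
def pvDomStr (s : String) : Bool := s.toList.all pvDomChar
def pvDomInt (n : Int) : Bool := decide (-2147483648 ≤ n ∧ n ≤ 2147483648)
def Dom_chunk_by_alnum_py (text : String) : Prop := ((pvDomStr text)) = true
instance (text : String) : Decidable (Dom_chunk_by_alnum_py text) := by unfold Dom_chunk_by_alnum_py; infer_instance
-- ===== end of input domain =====

-- B replaces A's single-pass run accumulator by two staged passes: first compute the cut
-- indices where the isalnum class flips, then slice the string at those boundaries
-- (objective: alternative decomposition, same O(n) cost).

-- ===== PORT A =====
-- one loop iteration: (chunks, current_chars, is_alnum) updated by char c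
def chunkStepA (st : List String × List Char × Option Bool) (c : Char) :
    List String × List Char × Option Bool :=
  let char_alnum := PySem.Chars.isalnum c
  let is_alnum := match st.2.2 with
    | none => char_alnum        -- 'if is_alnum is None: is_alnum = char_alnum'
    | some b => b
  if char_alnum == is_alnum then (st.1, st.2.1 ++ [c], some is_alnum)
  else (st.1 ++ [String.mk st.2.1], [c], some char_alnum)

def chunk_by_alnum_py (text : String) : List String :=
  if text.toList = [] then []                     -- 'if not text: return []'
  else
    let st := text.toList.foldl chunkStepA ([], [], none)
    if st.2.1 = [] then st.1 else st.1 ++ [String.mk st.2.1]   -- 'if current_chars: …'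

-- ===== PORT B =====
-- 'cuts = [i for i in range(1, len(text)) if keys[i] != keys[i-1]]'; indices are Python
-- ints that are provably ≥ 0, ported as Nat; keys[i] via getD (indices always in range).
def altCuts (keys : List Bool) : List Nat :=
  (List.range' 1 (keys.length - 1)).filter
    (fun i => keys.getD i false != keys.getD (i - 1) false)

-- 'text[a:b]' for 0 ≤ a ≤ b ≤ len(text): exact as drop,take on that range
def altSlice (l : List Char) (a b : Nat) : List Char := (l.drop a).take (b - a)

def chunk_by_alnum_py_alt (text : String) : List String :=
  let l := text.toList
  if l = [] then []                               -- 'if not text: return []'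
  else
    let keys := l.map PySem.Chars.isalnum         -- 'keys = [ch.isalnum() for ch in text]'
    let bounds := 0 :: (altCuts keys ++ [l.length])   -- 'bounds = [0] + cuts + [len(text)]'
    (bounds.zip bounds.tail).map (fun ab => String.mk (altSlice l ab.1 ab.2))
      -- '[text[a:b] for a, b in zip(bounds, bounds[1:])]'

-- ===== PRECONDITION & SPEC =====
def Spec_chunk_by_alnum_py (text : String) (out : List String) : Prop := out = chunk_by_alnum_py_alt text
instance (text : String) (out : List String) : Decidable (Spec_chunk_by_alnum_py text out) := by unfold Spec_chunk_by_alnum_py; infer_instance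

-- ===== CLAIM (what is proved, stated in full; the proofs are below) =====
def Claim_equal_chunk_by_alnum_py : Prop := ∀ (text : String), Dom_chunk_by_alnum_py text → Spec_chunk_by_alnum_py text (chunk_by_alnum_py text)

-- ===== LEMMAS AND PROOFS =====

-- reference decomposition: maximal runs of equal isalnum class
def chunkRuns : List Char → List (List Char)
  | [] => []
  | c :: cs =>
      (c :: (cs.span fun d => PySem.Chars.isalnum d == PySem.Chars.isalnum c).1) ::
      chunkRuns (cs.span fun d => PySem.Chars.isalnum d == PySem.Chars.isalnum c).2
termination_by l => l.length
decreasing_by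
  simp only [List.span_eq_takeWhile_dropWhile, List.length_cons]
  exact Nat.lt_succ_of_le (List.length_dropWhile_le _ _)

@[simp] lemma chunkRuns_nil : chunkRuns [] = [] := by rw [chunkRuns]

@[simp] lemma chunkRuns_cons (c : Char) (cs : List Char) :
    chunkRuns (c :: cs)
    = (c :: cs.takeWhile (fun d => PySem.Chars.isalnum d == PySem.Chars.isalnum c)) ::
      chunkRuns (cs.dropWhile (fun d => PySem.Chars.isalnum d == PySem.Chars.isalnum c)) := by
  rw [chunkRuns]; simp [List.span_eq_takeWhile_dropWhile]

lemma flatten_chunkRuns (l : List Char) : (chunkRuns l).flatten = l := by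
  induction l using chunkRuns.induct with
  | case1 => simp
  | case2 c cs ih =>
      simp only [List.span_eq_takeWhile_dropWhile] at ih
      simp [ih, List.takeWhile_append_dropWhile]

-- A's loop from state (chunks, cur, some b), cur nonempty, plus the final flush,
-- yields the pending run completed by the b-run of cs, then the runs of the rest.
lemma chunk_loopA (cs : List Char) (chunks : List String) (cur : List Char) (b : Bool)
    (hcur : cur ≠ []) :
    (let st := cs.foldl chunkStepA (chunks, cur, some b)
     if st.2.1 = [] then st.1 else st.1 ++ [String.mk st.2.1])
    = chunks ++
        ((cur ++ cs.takeWhile (fun d => PySem.Chars.isalnum d == b)) ::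
          chunkRuns (cs.dropWhile (fun d => PySem.Chars.isalnum d == b))).map
          (fun run => String.mk run) := by
  induction cs generalizing chunks cur b with
  | nil =>
      simp [hcur]
  | cons c rest ih =>
      by_cases h : PySem.Chars.isalnum c = b
      · have hstep : chunkStepA (chunks, cur, some b) c = (chunks, cur ++ [c], some b) := by
          simp [chunkStepA, h]
        simp only [List.foldl_cons, hstep, List.takeWhile_cons, List.dropWhile_cons, h]
        rw [ih chunks (cur ++ [c]) b (by simp)]
        simp
      · have hstep : chunkStepA (chunks, cur, some b) c
            = (chunks ++ [String.mk cur], [c], some (PySem.Chars.isalnum c)) := by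
          simp [chunkStepA, h]
        simp only [List.foldl_cons, hstep, List.takeWhile_cons, List.dropWhile_cons]
        rw [ih (chunks ++ [String.mk cur]) [c] (PySem.Chars.isalnum c) (by simp)]
        simp [h]

-- structural recursion equivalent to B's filtered index range
def cutsRec : List Bool → Nat → List Nat
  | [], _ => []
  | [_], _ => []
  | a :: b :: rest, s =>
      if a == b then cutsRec (b :: rest) (s + 1)
      else (s + 1) :: cutsRec (b :: rest) (s + 1)

-- partial sums starting from s
def psum : Nat → List Nat → List Nat
  | _, [] => []
  | s, a :: ls => (s + a) :: psum (s + a) ls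

lemma getD_of_drop (full ks : List Bool) (s i : Nat) (h : full.drop s = ks) :
    full.getD (s + i) false = ks.getD i false := by
  simp [List.getD_eq_getElem?_getD, ← h, List.getElem?_drop]

lemma cuts_filter (ks : List Bool) : ∀ (full : List Bool) (s : Nat), full.drop s = ks →
    (List.range' (s + 1) (ks.length - 1)).filter
      (fun i => full.getD i false != full.getD (i - 1) false) = cutsRec ks s := by
  induction ks with
  | nil => intro full s h; simp [cutsRec]
  | cons a t ih =>
      intro full s h
      cases t with
      | nil => simp [cutsRec]
      | cons b rest =>
          have ha : full.getD s false = a := by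
            have := getD_of_drop full (a :: b :: rest) s 0 h; simpa using this
          have hb : full.getD (s + 1) false = b := by
            have := getD_of_drop full (a :: b :: rest) s 1 h; simpa using this
          have hdrop : full.drop (s + 1) = b :: rest := by
            have : full.drop (s + 1) = (full.drop s).drop 1 := by
              rw [List.drop_drop]
            rw [this, h]; rfl
          have hlen : (a :: b :: rest : List Bool).length - 1 = rest.length + 1 := by simp
          rw [hlen, List.range'_succ, List.filter_cons]
          have hpred : (full.getD (s + 1) false != full.getD (s + 1 - 1) false)
              = !(a == b) := by
            rw [Nat.add_sub_cancel, ha, hb]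
            cases a <;> cases b <;> rfl
          have hrec := ih full (s + 1) hdrop
          have hlen2 : (b :: rest : List Bool).length - 1 = rest.length := by simp
          rw [hlen2] at hrec
          rw [hpred, hrec]
          cases hab : (a == b) <;> simp [cutsRec, hab]

lemma psum_shift (s a : Nat) (ls : List Nat) :
    psum s ((a + 1) :: ls) = psum (s + 1) (a :: ls) := by
  simp only [psum]
  have : s + (a + 1) = s + 1 + a := by omega
  rw [this]

lemma cutsRec_psum (cs : List Char) : ∀ (c : Char) (s : Nat),
    cutsRec ((c :: cs).map PySem.Chars.isalnum) s ++ [s + 1 + cs.length]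
      = psum s ((chunkRuns (c :: cs)).map List.length) := by
  induction cs with
  | nil => intro c s; simp [cutsRec, psum]
  | cons c2 rest ih =>
      intro c s
      by_cases h : PySem.Chars.isalnum c = PySem.Chars.isalnum c2
      · have hfun : (fun d => PySem.Chars.isalnum d == PySem.Chars.isalnum c)
            = (fun d => PySem.Chars.isalnum d == PySem.Chars.isalnum c2) := by
          funext d; rw [h]
        have hcuts : cutsRec ((c :: c2 :: rest).map PySem.Chars.isalnum) s
            = cutsRec ((c2 :: rest).map PySem.Chars.isalnum) (s + 1) := by
          simp [cutsRec, h]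
        rw [hcuts]
        have hruns : chunkRuns (c :: c2 :: rest)
            = (c :: c2 :: rest.takeWhile (fun d => PySem.Chars.isalnum d == PySem.Chars.isalnum c2))
              :: chunkRuns (rest.dropWhile (fun d => PySem.Chars.isalnum d == PySem.Chars.isalnum c2)) := by
          rw [chunkRuns_cons, hfun, List.takeWhile_cons, List.dropWhile_cons]
          simp [h]
        rw [hruns]
        have ih' := ih c2 (s + 1)
        rw [chunkRuns_cons] at ih'
        have hst : s + 1 + (c2 :: rest : List Char).length = s + 1 + 1 + rest.length := by
          simp; omega
        rw [hst, ih']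
        rw [List.map_cons, List.map_cons, List.length_cons]
        exact (psum_shift s _ _).symm
      · have hcuts : cutsRec ((c :: c2 :: rest).map PySem.Chars.isalnum) s
            = (s + 1) :: cutsRec ((c2 :: rest).map PySem.Chars.isalnum) (s + 1) := by
          simp only [List.map_cons, cutsRec]
          have : (PySem.Chars.isalnum c == PySem.Chars.isalnum c2) = false := by
            simpa using h
          rw [this]
          simp
      -- runs: first run is [c], rest are runs of c2::rest
        have hruns : chunkRuns (c :: c2 :: rest) = [c] :: chunkRuns (c2 :: rest) := by
          rw [chunkRuns_cons, List.takeWhile_cons, List.dropWhile_cons]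
          have : (PySem.Chars.isalnum c2 == PySem.Chars.isalnum c) = false := by
            simp; exact fun e => h e.symm
          simp [this]
        rw [hcuts, hruns]
        simp only [List.map_cons, List.length_cons, List.length_nil, List.cons_append]
        have harith : s + 1 + (rest.length + 1) = s + 1 + 1 + rest.length := by omega
        rw [harith, ← List.map_cons, ih c2 (s + 1)]
        simp [psum]

lemma slices_psum (rs : List (List Char)) : ∀ (pre : List Char),
    (((pre.length :: psum pre.length (rs.map List.length)).zip
        (psum pre.length (rs.map List.length))).map
      (fun ab => altSlice (pre ++ rs.flatten) ab.1 ab.2)) = rs := by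
  induction rs with
  | nil => intro pre; simp [psum]
  | cons r rs' ih =>
      intro pre
      simp only [List.map_cons, psum, List.zip_cons_cons, List.flatten_cons]
      have hslice : altSlice (pre ++ (r ++ rs'.flatten)) pre.length (pre.length + r.length) = r := by
        unfold altSlice
        rw [Nat.add_sub_cancel_left, List.drop_left, List.take_left']
        rfl
      have ih' := ih (pre ++ r)
      rw [List.length_append, List.append_assoc] at ih'
      rw [hslice, ih']

-- ===== VERDICT (by name: the statement is the Claim_ definition above) =====
theorem chunk_by_alnum_py_spec : Claim_equal_chunk_by_alnum_py := by
  intro text _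
  unfold Spec_chunk_by_alnum_py chunk_by_alnum_py chunk_by_alnum_py_alt
  cases htl : text.toList with
  | nil => simp
  | cons c cs =>
      simp only [List.cons_ne_nil, if_neg, reduceCtorEq]
      -- A side equals the runs
      have hA :
          (let st := (c :: cs).foldl chunkStepA ([], [], none)
           if st.2.1 = [] then st.1 else st.1 ++ [String.mk st.2.1])
          = (chunkRuns (c :: cs)).map (fun run => String.mk run) := by
        have hstep : chunkStepA ([], [], none) c = ([], [c], some (PySem.Chars.isalnum c)) := by
          simp [chunkStepA]
        simp only [List.foldl_cons, hstep]
        rw [chunk_loopA cs [] [c] (PySem.Chars.isalnum c) (by simp)]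
        simp
      -- B side equals the runs
      have hcuts : altCuts ((c :: cs).map PySem.Chars.isalnum)
          = cutsRec ((c :: cs).map PySem.Chars.isalnum) 0 := by
        unfold altCuts
        have := cuts_filter ((c :: cs).map PySem.Chars.isalnum)
          ((c :: cs).map PySem.Chars.isalnum) 0 (by simp)
        simpa using this
      have hbounds : altCuts ((c :: cs).map PySem.Chars.isalnum) ++ [(c :: cs : List Char).length]
          = psum 0 ((chunkRuns (c :: cs)).map List.length) := by
        rw [hcuts, show (c :: cs : List Char).length = 0 + 1 + cs.length by simp [Nat.add_comm]]
        exact cutsRec_psum cs c 0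
      have hB :
          ((0 :: (altCuts ((c :: cs).map PySem.Chars.isalnum) ++ [(c :: cs : List Char).length])).zip
              (altCuts ((c :: cs).map PySem.Chars.isalnum) ++ [(c :: cs : List Char).length])).map
            (fun ab => String.mk (altSlice (c :: cs) ab.1 ab.2))
          = (chunkRuns (c :: cs)).map (fun run => String.mk run) := by
        rw [hbounds]
        have := slices_psum (chunkRuns (c :: cs)) []
        rw [flatten_chunkRuns] at this
        simp only [List.length_nil, List.nil_append] at this
        calc ((0 :: psum 0 ((chunkRuns (c :: cs)).map List.length)).zip
                (psum 0 ((chunkRuns (c :: cs)).map List.length))).map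
              (fun ab => String.mk (altSlice (c :: cs) ab.1 ab.2))
            = (((0 :: psum 0 ((chunkRuns (c :: cs)).map List.length)).zip
                (psum 0 ((chunkRuns (c :: cs)).map List.length))).map
              (fun ab => altSlice (c :: cs) ab.1 ab.2)).map (fun run => String.mk run) := by
              rw [List.map_map]; rfl
          _ = (chunkRuns (c :: cs)).map (fun run => String.mk run) := by rw [this]
      simp only [List.tail_cons] at *
      rw [hA, ← hB]
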